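-- pv_equiv track=rewrite | github.com/ImLJS/dsa | stacks_queues/algorithm/monotonic_stack.py | get_next_prev_indices
-- ===== SOURCE A (Python) =====
-- def get_next_prev_indices(arr):
--     """
--     Returns indices of next and previous greater/smaller elements.
--     Useful for problems like largest rectangle in histogram.
--     """
--     n = len(arr)
--     next_greater_idx = [n] * n
--     prev_greater_idx = [-1] * n
--     next_smaller_idx = [n] * n
--     prev_smaller_idx = [-1] * n
--
--     # Next greater indices
--     stack = []
--     for i in range(n):
--         while stack and arr[stack[-1]] < arr[i]:
--             next_greater_idx[stack.pop()] = i
--         stack.append(i)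
--
--     # Previous greater indices
--     stack = []
--     for i in range(n - 1, -1, -1):
--         while stack and arr[stack[-1]] < arr[i]:
--             prev_greater_idx[stack.pop()] = i
--         stack.append(i)
--
--     # Next smaller indices
--     stack = []
--     for i in range(n):
--         while stack and arr[stack[-1]] > arr[i]:
--             next_smaller_idx[stack.pop()] = i
--         stack.append(i)
--
--     # Previous smaller indices
--     stack = []
--     for i in range(n - 1, -1, -1):
--         while stack and arr[stack[-1]] > arr[i]:
--             prev_smaller_idx[stack.pop()] = i
--         stack.append(i)
--
--     return {
--         "next_greater": next_greater_idx,
--         "prev_greater": prev_greater_idx,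
--         "next_smaller": next_smaller_idx,
--         "prev_smaller": prev_smaller_idx,
--     }
-- ===== SOURCE B (Python) =====
-- def get_next_prev_indices(arr):
--     """Brute-force directional scans instead of monotonic stacks (simpler)."""
--     n = len(arr)
--
--     def first(js, pred, default):
--         return next((j for j in js if pred(arr[j])), default)
--
--     return {
--         "next_greater": [first(range(i + 1, n), lambda x, v=arr[i]: x > v, n) for i in range(n)],
--         "prev_greater": [first(range(i - 1, -1, -1), lambda x, v=arr[i]: x > v, -1) for i in range(n)],
--         "next_smaller": [first(range(i + 1, n), lambda x, v=arr[i]: x < v, n) for i in range(n)],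
--         "prev_smaller": [first(range(i - 1, -1, -1), lambda x, v=arr[i]: x < v, -1) for i in range(n)],
--     }
-- ===== Notes on version B (the rewrite author's own statement) =====
-- stated objective: simpler
-- what changed: Replaces the four monotonic-stack passes with direct brute-force directional scans: for each index, scan right for the first strictly greater/smaller element and left for the last one before it, with defaults n and -1.
import Mathlib
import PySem

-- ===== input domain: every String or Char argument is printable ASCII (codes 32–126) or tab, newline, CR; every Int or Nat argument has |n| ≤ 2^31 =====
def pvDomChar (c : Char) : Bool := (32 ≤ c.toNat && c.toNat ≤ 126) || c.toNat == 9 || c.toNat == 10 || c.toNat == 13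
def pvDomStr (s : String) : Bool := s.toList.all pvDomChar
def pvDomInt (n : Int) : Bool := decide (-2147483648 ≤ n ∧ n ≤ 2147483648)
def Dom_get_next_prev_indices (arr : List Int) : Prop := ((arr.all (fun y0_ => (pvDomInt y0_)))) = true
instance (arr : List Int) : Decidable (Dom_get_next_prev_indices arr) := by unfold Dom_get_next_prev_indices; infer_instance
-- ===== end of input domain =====

-- B replaces A's monotonic stacks with per-index brute-force directional scans (simpler; O(n^2) vs A's O(n)).


-- ===== PORT A =====
-- the inner 'while stack and arr[stack[-1]] <cmp> arr[i]: res[stack.pop()] = i'; stack held as a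
-- Lean list with head = Python's stack[-1]; indices are range(n) values, hence Nat; arr.getD k 0
-- is exact for these in-range non-negative indices
def pvPop (arr : List Int) (lt : Int → Int → Bool) (i : Nat) : List Int → List Nat → List Int × List Nat
  | res, [] => (res, [])
  | res, t :: rest =>
    if lt (arr.getD t 0) (arr.getD i 0) then
      pvPop arr lt i (res.set t (i : Int)) rest
    else (res, t :: rest)

-- one iteration of 'for i in …': pop-while, then stack.append(i)
def pvStep (arr : List Int) (lt : Int → Int → Bool) (st : List Int × List Nat) (i : Nat) : List Int × List Nat :=
  let p := pvPop arr lt i st.1 st.2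
  (p.1, i :: p.2)

-- a whole pass: res initialised to [d] * n, stack = [], loop over the given index order
def pvRun (arr : List Int) (lt : Int → Int → Bool) (d : Int) (idxs : List Nat) : List Int × List Nat :=
  idxs.foldl (pvStep arr lt) (List.replicate arr.length d, [])

def get_next_prev_indices (arr : List Int) : List (String × List Int) :=
  let n := arr.length
  [("next_greater", (pvRun arr (fun a b => decide (a < b)) (n : Int) (List.range n)).1),
   ("prev_greater", (pvRun arr (fun a b => decide (a < b)) (-1) ((List.range n).reverse)).1),
   ("next_smaller", (pvRun arr (fun a b => decide (b < a)) (n : Int) (List.range n)).1),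
   ("prev_smaller", (pvRun arr (fun a b => decide (b < a)) (-1) ((List.range n).reverse)).1)]

-- ===== PORT B =====
-- 'first(js, pred, default)': first index j in js with pred(arr[j]), else default
def pvScan (arr : List Int) (p : Int → Bool) (js : List Nat) (d : Int) : Int :=
  match js.find? (fun j => p (arr.getD j 0)) with
  | some j => (j : Int)
  | none => d

def get_next_prev_indices_alt (arr : List Int) : List (String × List Int) :=
  let n := arr.length
  [("next_greater", (List.range n).map (fun i =>
      pvScan arr (fun x => decide (arr.getD i 0 < x)) (List.range' (i + 1) (n - (i + 1))) (n : Int))),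
   ("prev_greater", (List.range n).map (fun i =>
      pvScan arr (fun x => decide (arr.getD i 0 < x)) ((List.range i).reverse) (-1))),
   ("next_smaller", (List.range n).map (fun i =>
      pvScan arr (fun x => decide (x < arr.getD i 0)) (List.range' (i + 1) (n - (i + 1))) (n : Int))),
   ("prev_smaller", (List.range n).map (fun i =>
      pvScan arr (fun x => decide (x < arr.getD i 0)) ((List.range i).reverse) (-1)))]

-- ===== PRECONDITION & SPEC =====
def Spec_get_next_prev_indices (arr : List Int) (out : List (String × List Int)) : Prop := out = get_next_prev_indices_alt arr
instance (arr : List Int) (out : List (String × List Int)) : Decidable (Spec_get_next_prev_indices arr out) := by unfold Spec_get_next_prev_indices; infer_instance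

-- ===== CLAIM (what is proved, stated in full; the proofs are below) =====
def Claim_equal_get_next_prev_indices : Prop := ∀ (arr : List Int), Dom_get_next_prev_indices arr → Spec_get_next_prev_indices arr (get_next_prev_indices arr)

-- ===== LEMMAS AND PROOFS =====

-- invariant of a forward pass after the indices < i have been processed
def FInv (arr : List Int) (lt : Int → Int → Bool) (d : Int) (i : Nat) (res : List Int) (stack : List Nat) : Prop :=
  res.length = arr.length ∧
  (∀ k ∈ stack, k < i) ∧
  stack.Pairwise (fun x y => y < x ∧ lt (arr.getD y 0) (arr.getD x 0) = false) ∧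
  (∀ k ∈ stack, (∀ j, k < j → j < i → lt (arr.getD k 0) (arr.getD j 0) = false) ∧ res.getD k 0 = d) ∧
  (∀ k, k < i → k ∉ stack → ∃ j₀, k < j₀ ∧ j₀ < i ∧ lt (arr.getD k 0) (arr.getD j₀ 0) = true ∧
      (∀ j, k < j → j < j₀ → lt (arr.getD k 0) (arr.getD j 0) = false) ∧ res.getD k 0 = (j₀ : Int)) ∧
  (∀ k, i ≤ k → k < arr.length → res.getD k 0 = d)

-- invariant of a backward pass after the indices ≥ i have been processed
def BInv (arr : List Int) (lt : Int → Int → Bool) (d : Int) (i : Nat) (res : List Int) (stack : List Nat) : Prop :=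
  res.length = arr.length ∧
  (∀ k ∈ stack, i ≤ k ∧ k < arr.length) ∧
  stack.Pairwise (fun x y => x < y ∧ lt (arr.getD y 0) (arr.getD x 0) = false) ∧
  (∀ k ∈ stack, (∀ j, i ≤ j → j < k → lt (arr.getD k 0) (arr.getD j 0) = false) ∧ res.getD k 0 = d) ∧
  (∀ k, i ≤ k → k < arr.length → k ∉ stack → ∃ j₀, i ≤ j₀ ∧ j₀ < k ∧ lt (arr.getD k 0) (arr.getD j₀ 0) = true ∧
      (∀ j, j₀ < j → j < k → lt (arr.getD k 0) (arr.getD j 0) = false) ∧ res.getD k 0 = (j₀ : Int)) ∧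
  (∀ k, k < i → res.getD k 0 = d)

theorem pop_spec (arr : List Int) (lt : Int → Int → Bool)
    (H : ∀ a b c, lt a b = false → lt b c = false → lt a c = false) (i : Nat) :
    ∀ (stack : List Nat) (res : List Int),
      (∀ k ∈ stack, k < res.length) →
      stack.Pairwise (fun x y => lt (arr.getD y 0) (arr.getD x 0) = false) →
      ∃ popped, stack = popped ++ (pvPop arr lt i res stack).2 ∧
        (∀ k ∈ popped, lt (arr.getD k 0) (arr.getD i 0) = true) ∧
        (∀ k ∈ (pvPop arr lt i res stack).2, lt (arr.getD k 0) (arr.getD i 0) = false) ∧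
        (∀ m : Nat, (pvPop arr lt i res stack).1.getD m 0 = if m ∈ popped then (i : Int) else res.getD m 0) ∧
        (pvPop arr lt i res stack).1.length = res.length := by
  intro stack
  induction stack with
  | nil => intro res _ _; exact ⟨[], by simp [pvPop], by simp, by simp [pvPop], by simp [pvPop], by simp [pvPop]⟩
  | cons t rest ih =>
    intro res hlen hpair
    by_cases h : lt (arr.getD t 0) (arr.getD i 0) = false
    · -- pop stops here
      have hred : pvPop arr lt i res (t :: rest) = (res, t :: rest) := by
        simp only [pvPop]; rw [h]; simp
      refine ⟨[], by simp [hred], by simp, ?_, by simp [hred], by simp [hred]⟩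
      rw [hred]
      intro k hk
      rcases List.mem_cons.mp hk with rfl | hk
      · exact h
      · exact H _ _ _ ((List.pairwise_cons.mp hpair).1 k hk) h
    · -- pop t, continue on rest
      have h : lt (arr.getD t 0) (arr.getD i 0) = true := by simpa using h
      have ht : t < res.length := hlen t (by simp)
      have hred : pvPop arr lt i res (t :: rest) = pvPop arr lt i (res.set t (i : Int)) rest := by
        simp only [pvPop]; rw [h]; simp
      obtain ⟨popped', heq, hp1, hp2, hp3, hp4⟩ := ih (res.set t (i : Int))
        (by intro k hk; rw [List.length_set]; exact hlen k (List.mem_cons_of_mem _ hk))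
        (List.pairwise_cons.mp hpair).2
      refine ⟨t :: popped', ?_, ?_, ?_, ?_, ?_⟩
      · rw [hred, List.cons_append, ← heq]
      · intro k hk
        rcases List.mem_cons.mp hk with rfl | hk
        · exact h
        · exact hp1 k hk
      · rw [hred]; exact hp2
      · intro m
        rw [hred, hp3 m]
        by_cases hmt : m = t
        · subst hmt
          by_cases hmp : m ∈ popped' <;> simp [hmp, List.getD, ht]
        · have : (res.set t (i : Int)).getD m 0 = res.getD m 0 := by
            simp [List.getD, (Ne.symm hmt : t ≠ m)]
          rw [this]
          simp [List.mem_cons, hmt]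
      · rw [hred, hp4, List.length_set]

theorem step_FInv (arr : List Int) (lt : Int → Int → Bool)
    (H : ∀ a b c, lt a b = false → lt b c = false → lt a c = false) (d : Int)
    (i : Nat) (hi : i < arr.length) (st : List Int × List Nat)
    (hinv : FInv arr lt d i st.1 st.2) :
    FInv arr lt d (i + 1) (pvStep arr lt st i).1 (pvStep arr lt st i).2 := by
  obtain ⟨h1, h2, h3, h4, h5, h6⟩ := hinv
  have hlen : ∀ k ∈ st.2, k < st.1.length := fun k hk => by
    rw [h1]; exact Nat.lt_trans (h2 k hk) hi
  have hpair' : st.2.Pairwise (fun x y => lt (arr.getD y 0) (arr.getD x 0) = false) :=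
    h3.imp (fun h => h.2)
  obtain ⟨popped, heq, hp1, hp2, hp3, hp4⟩ := pop_spec arr lt H i st.2 st.1 hlen hpair'
  have hstep1 : (pvStep arr lt st i).1 = (pvPop arr lt i st.1 st.2).1 := rfl
  have hstep2 : (pvStep arr lt st i).2 = i :: (pvPop arr lt i st.1 st.2).2 := rfl
  rw [hstep1, hstep2]
  have hsub' : ∀ k ∈ (pvPop arr lt i st.1 st.2).2, k ∈ st.2 := fun k hk =>
    heq ▸ List.mem_append_right popped hk
  have hsubp : ∀ k ∈ popped, k ∈ st.2 := fun k hk => heq ▸ List.mem_append_left _ hk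
  have hcross : ∀ x ∈ popped, ∀ y ∈ (pvPop arr lt i st.1 st.2).2, y < x := fun x hx y hy =>
    ((List.pairwise_append.mp (heq ▸ h3)).2.2 x hx y hy).1
  have hdisj : ∀ k ∈ (pvPop arr lt i st.1 st.2).2, k ∉ popped := fun k hk hkp =>
    absurd (hcross k hkp k hk) (lt_irrefl k)
  have hinotp : i ∉ popped := fun hip => absurd (h2 i (hsubp i hip)) (lt_irrefl i)
  refine ⟨by rw [hp4]; exact h1, ?_, ?_, ?_, ?_, ?_⟩
  · intro k hk
    rcases List.mem_cons.mp hk with rfl | hk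
    · omega
    · exact Nat.lt_succ_of_lt (h2 k (hsub' k hk))
  · refine List.pairwise_cons.mpr ⟨?_, ?_⟩
    · intro y hy; exact ⟨h2 y (hsub' y hy), hp2 y hy⟩
    · exact (List.pairwise_append.mp (heq ▸ h3)).2.1
  · intro k hk
    rcases List.mem_cons.mp hk with rfl | hk
    · refine ⟨fun j hj1 hj2 => absurd hj1 (by omega), ?_⟩
      rw [hp3 k, if_neg hinotp]
      exact h6 k le_rfl hi
    · refine ⟨?_, ?_⟩
      · intro j hj1 hj2
        by_cases hji : j = i
        · subst hji; exact hp2 k hk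
        · exact (h4 k (hsub' k hk)).1 j hj1 (by omega)
      · rw [hp3 k, if_neg (hdisj k hk)]; exact (h4 k (hsub' k hk)).2
  · intro k hk hkn
    have hki : k ≠ i := fun he => hkn (he ▸ List.mem_cons_self)
    have hk' : k < i := by omega
    have hkns : k ∉ (pvPop arr lt i st.1 st.2).2 := fun hks => hkn (List.mem_cons_of_mem _ hks)
    by_cases hkp : k ∈ popped
    · refine ⟨i, hk', Nat.lt_succ_self i, hp1 k hkp, ?_, ?_⟩
      · intro j hj1 hj2; exact (h4 k (hsubp k hkp)).1 j hj1 hj2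
      · rw [hp3 k, if_pos hkp]
    · have hknst : k ∉ st.2 := by rw [heq]; simp [List.mem_append, hkp, hkns]
      obtain ⟨j₀, hj1, hj2, hj3, hj4, hj5⟩ := h5 k hk' hknst
      exact ⟨j₀, hj1, by omega, hj3, hj4, by rw [hp3 k, if_neg hkp]; exact hj5⟩
  · intro k hk hklen
    have hkp : k ∉ popped := fun hkp => by have := h2 k (hsubp k hkp); omega
    rw [hp3 k, if_neg hkp]; exact h6 k (by omega) hklen

theorem step_BInv (arr : List Int) (lt : Int → Int → Bool)
    (H : ∀ a b c, lt a b = false → lt b c = false → lt a c = false) (d : Int)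
    (i : Nat) (hi : i < arr.length) (st : List Int × List Nat)
    (hinv : BInv arr lt d (i + 1) st.1 st.2) :
    BInv arr lt d i (pvStep arr lt st i).1 (pvStep arr lt st i).2 := by
  obtain ⟨h1, h2, h3, h4, h5, h6⟩ := hinv
  have hlen : ∀ k ∈ st.2, k < st.1.length := fun k hk => by
    rw [h1]; exact (h2 k hk).2
  have hpair' : st.2.Pairwise (fun x y => lt (arr.getD y 0) (arr.getD x 0) = false) :=
    h3.imp (fun h => h.2)
  obtain ⟨popped, heq, hp1, hp2, hp3, hp4⟩ := pop_spec arr lt H i st.2 st.1 hlen hpair'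
  have hstep1 : (pvStep arr lt st i).1 = (pvPop arr lt i st.1 st.2).1 := rfl
  have hstep2 : (pvStep arr lt st i).2 = i :: (pvPop arr lt i st.1 st.2).2 := rfl
  rw [hstep1, hstep2]
  have hsub' : ∀ k ∈ (pvPop arr lt i st.1 st.2).2, k ∈ st.2 := fun k hk =>
    heq ▸ List.mem_append_right popped hk
  have hsubp : ∀ k ∈ popped, k ∈ st.2 := fun k hk => heq ▸ List.mem_append_left _ hk
  have hcross : ∀ x ∈ popped, ∀ y ∈ (pvPop arr lt i st.1 st.2).2, x < y := fun x hx y hy =>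
    ((List.pairwise_append.mp (heq ▸ h3)).2.2 x hx y hy).1
  have hdisj : ∀ k ∈ (pvPop arr lt i st.1 st.2).2, k ∉ popped := fun k hk hkp =>
    absurd (hcross k hkp k hk) (lt_irrefl k)
  have hinotp : i ∉ popped := fun hip => absurd (h2 i (hsubp i hip)).1 (by omega)
  refine ⟨by rw [hp4]; exact h1, ?_, ?_, ?_, ?_, ?_⟩
  · intro k hk
    rcases List.mem_cons.mp hk with rfl | hk
    · exact ⟨le_rfl, hi⟩
    · exact ⟨by have := (h2 k (hsub' k hk)).1; omega, (h2 k (hsub' k hk)).2⟩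
  · refine List.pairwise_cons.mpr ⟨?_, ?_⟩
    · intro y hy; exact ⟨by have := (h2 y (hsub' y hy)).1; omega, hp2 y hy⟩
    · exact (List.pairwise_append.mp (heq ▸ h3)).2.1
  · intro k hk
    rcases List.mem_cons.mp hk with rfl | hk
    · refine ⟨fun j hj1 hj2 => absurd hj2 (by omega), ?_⟩
      rw [hp3 k, if_neg hinotp]
      exact h6 k (by omega)
    · refine ⟨?_, ?_⟩
      · intro j hj1 hj2
        by_cases hji : j = i
        · subst hji; exact hp2 k hk
        · exact (h4 k (hsub' k hk)).1 j (by omega) hj2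
      · rw [hp3 k, if_neg (hdisj k hk)]; exact (h4 k (hsub' k hk)).2
  · intro k hk hklen hkn
    have hki : k ≠ i := fun he => hkn (he ▸ List.mem_cons_self)
    have hk' : i + 1 ≤ k := by omega
    have hkns : k ∉ (pvPop arr lt i st.1 st.2).2 := fun hks => hkn (List.mem_cons_of_mem _ hks)
    by_cases hkp : k ∈ popped
    · refine ⟨i, le_rfl, by have := (h2 k (hsubp k hkp)).1; omega, hp1 k hkp, ?_, ?_⟩
      · intro j hj1 hj2; exact (h4 k (hsubp k hkp)).1 j (by omega) hj2
      · rw [hp3 k, if_pos hkp]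
    · have hknst : k ∉ st.2 := by rw [heq]; simp [List.mem_append, hkp, hkns]
      obtain ⟨j₀, hj1, hj2, hj3, hj4, hj5⟩ := h5 k hk' hklen hknst
      exact ⟨j₀, by omega, hj2, hj3, hj4, by rw [hp3 k, if_neg hkp]; exact hj5⟩
  · intro k hk
    have hkp : k ∉ popped := fun hkp => by have := (h2 k (hsubp k hkp)).1; omega
    rw [hp3 k, if_neg hkp]; exact h6 k (by omega)

theorem run_FInv (arr : List Int) (lt : Int → Int → Bool)
    (H : ∀ a b c, lt a b = false → lt b c = false → lt a c = false) (d : Int) :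
    ∀ i, i ≤ arr.length →
      FInv arr lt d i
        ((List.range i).foldl (pvStep arr lt) (List.replicate arr.length d, [])).1
        ((List.range i).foldl (pvStep arr lt) (List.replicate arr.length d, [])).2 := by
  intro i
  induction i with
  | zero =>
    intro _
    simp only [List.range_zero, List.foldl_nil]
    refine ⟨by simp, by simp, by simp, by simp, ?_, ?_⟩
    · intro k hk; omega
    · intro k _ hk; simp [List.getD, hk]
  | succ i ih =>
    intro hle
    have h := step_FInv arr lt H d i (by omega) _ (ih (by omega))
    rw [List.range_succ, List.foldl_append, List.foldl_cons, List.foldl_nil]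
    exact h

theorem run_BInv (arr : List Int) (lt : Int → Int → Bool)
    (H : ∀ a b c, lt a b = false → lt b c = false → lt a c = false) (d : Int) :
    ∀ m, m ≤ arr.length →
      BInv arr lt d (arr.length - m)
        (((List.range' (arr.length - m) m).reverse).foldl (pvStep arr lt) (List.replicate arr.length d, [])).1
        (((List.range' (arr.length - m) m).reverse).foldl (pvStep arr lt) (List.replicate arr.length d, [])).2 := by
  intro m
  induction m with
  | zero =>
    intro _
    simp only [List.range'_zero, List.reverse_nil, List.foldl_nil, Nat.sub_zero]
    refine ⟨by simp, by simp, by simp, by simp, ?_, ?_⟩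
    · intro k h1 h2 _; omega
    · intro k hk; simp [List.getD, hk]
  | succ m ih =>
    intro hle
    have hi : arr.length - (m + 1) < arr.length := by omega
    have e1 : arr.length - m = (arr.length - (m + 1)) + 1 := by omega
    have e2 : List.range' (arr.length - (m + 1)) (m + 1) =
        (arr.length - (m + 1)) :: List.range' (arr.length - m) m := by
      rw [e1, List.range'_succ]
    rw [e2, List.reverse_cons, List.foldl_append, List.foldl_cons, List.foldl_nil]
    exact step_BInv arr lt H d _ hi _ (e1 ▸ ih (by omega))

theorem find?_range'_eq_none (q : Nat → Bool) (s len : Nat) (h : ∀ j, s ≤ j → j < s + len → q j = false) :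
    (List.range' s len).find? q = none := by
  rw [List.find?_eq_none]; intro j hj; rw [List.mem_range'_1] at hj; simp [h j hj.1 hj.2]

theorem find?_range'_eq_some (q : Nat → Bool) (len : Nat) : ∀ (s j₀ : Nat), s ≤ j₀ → j₀ < s + len → q j₀ = true →
    (∀ j, s ≤ j → j < j₀ → q j = false) → (List.range' s len).find? q = some j₀ := by
  induction len with
  | zero => intro s j₀ h1 h2; omega
  | succ m ih =>
    intro s j₀ h1 h2 h3 h4
    rw [List.range'_succ, List.find?_cons]
    by_cases hs : s = j₀
    · subst hs; simp [h3]
    · rw [h4 s le_rfl (by omega)]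
      exact ih (s + 1) j₀ (by omega) (by omega) h3 (fun j hj1 hj2 => h4 j (by omega) hj2)

theorem find?_revRange_eq_none (q : Nat → Bool) (k : Nat) (h : ∀ j, j < k → q j = false) :
    ((List.range k).reverse).find? q = none := by
  rw [List.find?_eq_none]; intro j hj; rw [List.mem_reverse, List.mem_range] at hj; simp [h j hj]

theorem find?_revRange_eq_some (q : Nat → Bool) (k : Nat) : ∀ (j₀ : Nat), j₀ < k → q j₀ = true →
    (∀ j, j₀ < j → j < k → q j = false) → ((List.range k).reverse).find? q = some j₀ := by
  induction k with
  | zero => intro j₀ h2; omega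
  | succ m ih =>
    intro j₀ h2 h3 h4
    have hrev : (List.range (m + 1)).reverse = m :: (List.range m).reverse := by
      rw [List.range_succ]; simp
    rw [hrev, List.find?_cons]
    by_cases hm : m = j₀
    · subst hm; simp [h3]
    · rw [h4 m (by omega) (by omega)]
      exact ih j₀ (by omega) h3 (fun j hj1 hj2 => h4 j hj1 (by omega))

theorem run_forward (arr : List Int) (lt : Int → Int → Bool)
    (H : ∀ a b c, lt a b = false → lt b c = false → lt a c = false) (d : Int) :
    (pvRun arr lt d (List.range arr.length)).1 =
      (List.range arr.length).map (fun k =>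
        pvScan arr (fun x => lt (arr.getD k 0) x) (List.range' (k + 1) (arr.length - (k + 1))) d) := by
  obtain ⟨h1, h2, h3, h4, h5, h6⟩ := run_FInv arr lt H d arr.length le_rfl
  unfold pvRun
  apply List.ext_getElem (by rw [h1]; simp)
  intro k hk1 hk2
  have hkn : k < arr.length := by simpa using hk2
  rw [List.getElem_map, List.getElem_range, ← List.getD_eq_getElem _ 0 hk1]
  by_cases hks : k ∈ ((List.range arr.length).foldl (pvStep arr lt) (List.replicate arr.length d, [])).2
  · have hnone := find?_range'_eq_none (fun j => lt (arr.getD k 0) (arr.getD j 0)) (k + 1)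
      (arr.length - (k + 1)) (fun j hj1 hj2 => (h4 k hks).1 j (by omega) (by omega))
    rw [(h4 k hks).2]
    simp only [pvScan]
    rw [hnone]
  · obtain ⟨j₀, hj1, hj2, hj3, hj4, hj5⟩ := h5 k hkn hks
    have hsome := find?_range'_eq_some (fun j => lt (arr.getD k 0) (arr.getD j 0))
      (arr.length - (k + 1)) (k + 1) j₀
      (by omega) (by omega) hj3 (fun j hja hjb => hj4 j (by omega) hjb)
    rw [hj5]
    simp only [pvScan]
    rw [hsome]

theorem run_backward (arr : List Int) (lt : Int → Int → Bool)
    (H : ∀ a b c, lt a b = false → lt b c = false → lt a c = false) (d : Int) :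
    (pvRun arr lt d ((List.range arr.length).reverse)).1 =
      (List.range arr.length).map (fun k =>
        pvScan arr (fun x => lt (arr.getD k 0) x) ((List.range k).reverse) d) := by
  have h0 := run_BInv arr lt H d arr.length le_rfl
  rw [Nat.sub_self, ← List.range_eq_range'] at h0
  obtain ⟨h1, h2, h3, h4, h5, h6⟩ := h0
  unfold pvRun
  apply List.ext_getElem (by rw [h1]; simp)
  intro k hk1 hk2
  have hkn : k < arr.length := by simpa using hk2
  rw [List.getElem_map, List.getElem_range, ← List.getD_eq_getElem _ 0 hk1]
  by_cases hks : k ∈ (((List.range arr.length).reverse).foldl (pvStep arr lt) (List.replicate arr.length d, [])).2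
  · have hnone := find?_revRange_eq_none (fun j => lt (arr.getD k 0) (arr.getD j 0)) k
      (fun j hj => (h4 k hks).1 j (by omega) hj)
    rw [(h4 k hks).2]
    simp only [pvScan]
    rw [hnone]
  · obtain ⟨j₀, hj1, hj2, hj3, hj4, hj5⟩ := h5 k (Nat.zero_le k) hkn hks
    have hsome := find?_revRange_eq_some (fun j => lt (arr.getD k 0) (arr.getD j 0)) k j₀ hj2 hj3 hj4
    rw [hj5]
    simp only [pvScan]
    rw [hsome]

theorem lt_trans_false : ∀ a b c : Int, decide (a < b) = false → decide (b < c) = false → decide (a < c) = false := by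
  intro a b c h1 h2; simp at *; omega

theorem gt_trans_false : ∀ a b c : Int, decide (b < a) = false → decide (c < b) = false → decide (c < a) = false := by
  intro a b c h1 h2; simp at *; omega

-- ===== VERDICT (by name: the statement is the Claim_ definition above) =====
theorem get_next_prev_indices_spec : Claim_equal_get_next_prev_indices := by
  intro arr _
  show _ = _
  simp only [get_next_prev_indices, get_next_prev_indices_alt]
  rw [run_forward arr _ lt_trans_false, run_backward arr _ lt_trans_false,
      run_forward arr _ gt_trans_false, run_backward arr _ gt_trans_false]
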